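-- pv_equiv track=rewrite | github.com/hauteuar/analyzer | mainframe_analyzer/modules/component_extractor.py | _classify_cics_io_operations
-- ===== SOURCE A (Python) =====
-- from typing import Dict, List, Optional, Any, Tuple
--
-- def _classify_cics_io_operations(cics_ops: List[Dict]) -> Dict:
--     """Classify CICS operations to determine I/O direction"""
--     operations = [op.get('operation', '').upper() for op in cics_ops]
--
--     has_read = any('READ' in op for op in operations)
--     has_write = any('WRITE' in op for op in operations)
--     has_rewrite = any('REWRITE' in op for op in operations)
--     has_delete = any('DELETE' in op for op in operations)
--
--     if has_rewrite or (has_read and has_write):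
--         return {
--             'relationship_type': 'CICS_INPUT_OUTPUT_FILE',
--             'io_direction': 'INPUT_OUTPUT'
--         }
--     elif has_read or has_delete:  # DELETE typically reads first
--         return {
--             'relationship_type': 'CICS_INPUT_FILE',
--             'io_direction': 'INPUT'
--         }
--     elif has_write:
--         return {
--             'relationship_type': 'CICS_OUTPUT_FILE',
--             'io_direction': 'OUTPUT'
--         }
--     else:
--         return {
--             'relationship_type': 'CICS_FILE',
--             'io_direction': 'UNKNOWN'
--         }
-- ===== SOURCE B (Python) =====
-- def _classify_cics_io_operations(cics_ops):
--     """Early-exit lattice state machine: join each op's keyword contribution into a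
--     growing state set, returning INPUT_OUTPUT as soon as the top of the I/O lattice
--     is reached; only the non-top states are decoded after the scan."""
--     state = set()
--     for op in cics_ops:
--         s = op.get('operation', '').upper()
--         if 'REWRITE' in s:
--             return {'relationship_type': 'CICS_INPUT_OUTPUT_FILE', 'io_direction': 'INPUT_OUTPUT'}
--         state |= {k for k in ('READ', 'WRITE', 'DELETE') if k in s}
--         if 'READ' in state and 'WRITE' in state:
--             return {'relationship_type': 'CICS_INPUT_OUTPUT_FILE', 'io_direction': 'INPUT_OUTPUT'}
--     if 'READ' in state or 'DELETE' in state: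
--         return {'relationship_type': 'CICS_INPUT_FILE', 'io_direction': 'INPUT'}
--     if 'WRITE' in state:
--         return {'relationship_type': 'CICS_OUTPUT_FILE', 'io_direction': 'OUTPUT'}
--     return {'relationship_type': 'CICS_FILE', 'io_direction': 'UNKNOWN'}
-- ===== Notes on version B (the rewrite author's own statement) =====
-- stated objective: alternative
-- what changed: Replaces A's intermediate uppercased list plus four separate any() scans and final cascade with an early-exit lattice state machine: a single pass joins each op's keyword contribution into a growing state set and returns INPUT_OUTPUT immediately once the top of the I/O lattice is reached (REWRITE seen, or READ and WRITE both accumulated); only the non-top states are decoded after the scan.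
import Mathlib
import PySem

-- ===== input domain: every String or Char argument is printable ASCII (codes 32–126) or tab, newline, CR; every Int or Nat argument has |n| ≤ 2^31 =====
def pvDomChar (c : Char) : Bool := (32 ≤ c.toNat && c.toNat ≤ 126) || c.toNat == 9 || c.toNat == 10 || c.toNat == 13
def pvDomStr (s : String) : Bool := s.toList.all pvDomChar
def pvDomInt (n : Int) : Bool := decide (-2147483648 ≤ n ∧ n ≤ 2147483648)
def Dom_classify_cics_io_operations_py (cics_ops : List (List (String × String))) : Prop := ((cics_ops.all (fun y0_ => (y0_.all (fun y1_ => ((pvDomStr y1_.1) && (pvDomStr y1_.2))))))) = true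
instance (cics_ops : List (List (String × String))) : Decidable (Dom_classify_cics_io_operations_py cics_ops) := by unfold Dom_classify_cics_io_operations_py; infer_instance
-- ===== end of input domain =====

-- B replaces A's four full any() scans and final cascade with an early-exit lattice state
-- machine: one recursive pass joins each op's keyword contribution into a state set and
-- returns INPUT_OUTPUT the moment the top of the I/O lattice is reached (objective: alternative).

-- ===== PORT A =====
-- A: build the list of uppercased operation strings, scan it four times with any(),
-- then the branch cascade.
def classify_cics_io_operations_py (cics_ops : List (List (String × String))) : List (String × String) :=
  let operations := cics_ops.map (fun op => PySem.Str.upper ((PySem.Dict.ofList op).getD "operation" ""))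
  let has_read := operations.any (fun op => PySem.Str.isIn "READ" op)
  let has_write := operations.any (fun op => PySem.Str.isIn "WRITE" op)
  let has_rewrite := operations.any (fun op => PySem.Str.isIn "REWRITE" op)
  let has_delete := operations.any (fun op => PySem.Str.isIn "DELETE" op)
  if has_rewrite || (has_read && has_write) then
    [("relationship_type", "CICS_INPUT_OUTPUT_FILE"), ("io_direction", "INPUT_OUTPUT")]
  else if has_read || has_delete then
    [("relationship_type", "CICS_INPUT_FILE"), ("io_direction", "INPUT")]
  else if has_write then
    [("relationship_type", "CICS_OUTPUT_FILE"), ("io_direction", "OUTPUT")]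
  else
    [("relationship_type", "CICS_FILE"), ("io_direction", "UNKNOWN")]

-- ===== PORT B =====
-- s = op.get('operation', '').upper() of Source B's loop body
def pvUp (op : List (String × String)) : String :=
  PySem.Str.upper ((PySem.Dict.ofList op).getD "operation" "")

-- Source B's loop with its two early returns, as structural recursion carrying the state set;
-- the post-loop decode of the non-top states is the base case.
def pvAltGo (ops : List (List (String × String))) (state : PySem.Set String) : List (String × String) :=
  match ops with
  | [] =>
    if PySem.Set.contains state "READ" || PySem.Set.contains state "DELETE" then
      [("relationship_type", "CICS_INPUT_FILE"), ("io_direction", "INPUT")]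
    else if PySem.Set.contains state "WRITE" then
      [("relationship_type", "CICS_OUTPUT_FILE"), ("io_direction", "OUTPUT")]
    else
      [("relationship_type", "CICS_FILE"), ("io_direction", "UNKNOWN")]
  | op :: rest =>
    let s := pvUp op
    if PySem.Str.isIn "REWRITE" s then
      [("relationship_type", "CICS_INPUT_OUTPUT_FILE"), ("io_direction", "INPUT_OUTPUT")]
    else
      let state' := PySem.Set.update state (["READ", "WRITE", "DELETE"].filter (fun k => PySem.Str.isIn k s))
      if PySem.Set.contains state' "READ" && PySem.Set.contains state' "WRITE" then
        [("relationship_type", "CICS_INPUT_OUTPUT_FILE"), ("io_direction", "INPUT_OUTPUT")]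
      else
        pvAltGo rest state'

def classify_cics_io_operations_py_alt (cics_ops : List (List (String × String))) : List (String × String) :=
  pvAltGo cics_ops PySem.Set.empty

-- ===== PRECONDITION & SPEC =====
def Spec_classify_cics_io_operations_py (cics_ops : List (List (String × String))) (out : List (String × String)) : Prop := out = classify_cics_io_operations_py_alt cics_ops
instance (cics_ops : List (List (String × String))) (out : List (String × String)) : Decidable (Spec_classify_cics_io_operations_py cics_ops out) := by unfold Spec_classify_cics_io_operations_py; infer_instance

-- ===== CLAIM (what is proved, stated in full; the proofs are below) =====
def Claim_equal_classify_cics_io_operations_py : Prop := ∀ (cics_ops : List (List (String × String))), Dom_classify_cics_io_operations_py cics_ops → Spec_classify_cics_io_operations_py cics_ops (classify_cics_io_operations_py cics_ops)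

-- ===== LEMMAS AND PROOFS =====

-- A's final cascade as a function of the four flags.
def pvCascade (r w rw d : Bool) : List (String × String) :=
  if rw || (r && w) then
    [("relationship_type", "CICS_INPUT_OUTPUT_FILE"), ("io_direction", "INPUT_OUTPUT")]
  else if r || d then
    [("relationship_type", "CICS_INPUT_FILE"), ("io_direction", "INPUT")]
  else if w then
    [("relationship_type", "CICS_OUTPUT_FILE"), ("io_direction", "OUTPUT")]
  else
    [("relationship_type", "CICS_FILE"), ("io_direction", "UNKNOWN")]

theorem pv_contains_add {s : PySem.Set String} {x a : String} :
    (PySem.Set.add s x).contains a = (s.contains a || x == a) := by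
  by_cases hax : a = x
  · subst hax
    simp only [PySem.Set.add]
    split <;> simp_all [PySem.Set.contains]
  · have hx : (x == a) = false := by simp; exact fun h => hax h.symm
    simp only [PySem.Set.add, hx, Bool.or_false]
    split
    · rfl
    · simp [PySem.Set.contains, hax]

theorem pv_contains_update (xs : List String) (s : PySem.Set String) (a : String) :
    (PySem.Set.update s xs).contains a = (s.contains a || xs.contains a) := by
  induction xs generalizing s with
  | nil => simp [PySem.Set.update]
  | cons x xs ih =>
    simp only [PySem.Set.update, List.foldl_cons] at *
    rw [ih, pv_contains_add]
    simp only [List.contains_cons, Bool.or_assoc]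
    clear ih
    cases hx : x == a
    · have hne : a ≠ x := fun h => by simp [h] at hx
      have hax : (a == x) = false := beq_eq_false_iff_ne.mpr hne
      simp [hax]
    · have he : x = a := beq_iff_eq.mp hx
      subst he
      simp

theorem pv_altGo_eq (ops : List (List (String × String))) (st : PySem.Set String)
    (h : (st.contains "READ" && st.contains "WRITE") = false) :
    pvAltGo ops st =
      pvCascade (st.contains "READ" || ops.any (fun op => PySem.Str.isIn "READ" (pvUp op)))
                (st.contains "WRITE" || ops.any (fun op => PySem.Str.isIn "WRITE" (pvUp op)))
                (ops.any (fun op => PySem.Str.isIn "REWRITE" (pvUp op)))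
                (st.contains "DELETE" || ops.any (fun op => PySem.Str.isIn "DELETE" (pvUp op))) := by
  induction ops generalizing st with
  | nil =>
    simp only [pvAltGo, pvCascade, List.any_nil, Bool.or_false, h,
      Bool.false_eq_true, if_false]
  | cons op rest ih =>
    simp only [pvAltGo, List.any_cons]
    cases hrw : PySem.Str.isIn "REWRITE" (pvUp op)
    case true => simp [pvCascade]
    case false =>
    simp only [Bool.false_eq_true, if_false, Bool.false_or]
    have hLR : (["READ", "WRITE", "DELETE"].filter (fun k => PySem.Str.isIn k (pvUp op))).contains "READ"
        = PySem.Str.isIn "READ" (pvUp op) := by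
      cases hR : PySem.Str.isIn "READ" (pvUp op) <;> cases hW : PySem.Str.isIn "WRITE" (pvUp op) <;>
        cases hD : PySem.Str.isIn "DELETE" (pvUp op) <;>
        simp only [List.filter_cons, List.filter_nil, hR, hW, hD] <;> decide
    have hLW : (["READ", "WRITE", "DELETE"].filter (fun k => PySem.Str.isIn k (pvUp op))).contains "WRITE"
        = PySem.Str.isIn "WRITE" (pvUp op) := by
      cases hR : PySem.Str.isIn "READ" (pvUp op) <;> cases hW : PySem.Str.isIn "WRITE" (pvUp op) <;>
        cases hD : PySem.Str.isIn "DELETE" (pvUp op) <;>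
        simp only [List.filter_cons, List.filter_nil, hR, hW, hD] <;> decide
    have hLD : (["READ", "WRITE", "DELETE"].filter (fun k => PySem.Str.isIn k (pvUp op))).contains "DELETE"
        = PySem.Str.isIn "DELETE" (pvUp op) := by
      cases hR : PySem.Str.isIn "READ" (pvUp op) <;> cases hW : PySem.Str.isIn "WRITE" (pvUp op) <;>
        cases hD : PySem.Str.isIn "DELETE" (pvUp op) <;>
        simp only [List.filter_cons, List.filter_nil, hR, hW, hD] <;> decide
    have hcondR : (PySem.Set.update st (["READ", "WRITE", "DELETE"].filter (fun k => PySem.Str.isIn k (pvUp op)))).contains "READ"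
        = (st.contains "READ" || PySem.Str.isIn "READ" (pvUp op)) := by
      rw [pv_contains_update, hLR]
    have hcondW : (PySem.Set.update st (["READ", "WRITE", "DELETE"].filter (fun k => PySem.Str.isIn k (pvUp op)))).contains "WRITE"
        = (st.contains "WRITE" || PySem.Str.isIn "WRITE" (pvUp op)) := by
      rw [pv_contains_update, hLW]
    have hcondD : (PySem.Set.update st (["READ", "WRITE", "DELETE"].filter (fun k => PySem.Str.isIn k (pvUp op)))).contains "DELETE"
        = (st.contains "DELETE" || PySem.Str.isIn "DELETE" (pvUp op)) := by
      rw [pv_contains_update, hLD]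
    rw [hcondR, hcondW]
    by_cases htop : ((st.contains "READ" || PySem.Str.isIn "READ" (pvUp op))
        && (st.contains "WRITE" || PySem.Str.isIn "WRITE" (pvUp op))) = true
    · rw [if_pos htop]
      revert htop
      simp only [pvCascade]
      generalize st.contains "READ" = p1
      generalize st.contains "WRITE" = p2
      generalize PySem.Str.isIn "READ" (pvUp op) = q1
      generalize PySem.Str.isIn "WRITE" (pvUp op) = q2
      generalize rest.any (fun op => PySem.Str.isIn "READ" (pvUp op)) = r1
      generalize rest.any (fun op => PySem.Str.isIn "WRITE" (pvUp op)) = r2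
      generalize rest.any (fun op => PySem.Str.isIn "REWRITE" (pvUp op)) = r3
      generalize st.contains "DELETE" = p3
      generalize PySem.Str.isIn "DELETE" (pvUp op) = q3
      generalize rest.any (fun op => PySem.Str.isIn "DELETE" (pvUp op)) = r4
      revert p1 p2 p3 q1 q2 q3 r1 r2 r3 r4
      decide
    · rw [if_neg htop]
      have htop' : ((st.contains "READ" || PySem.Str.isIn "READ" (pvUp op))
          && (st.contains "WRITE" || PySem.Str.isIn "WRITE" (pvUp op))) = false := Bool.eq_false_iff.mpr htop
      rw [ih _ (by rw [hcondR, hcondW]; exact htop')]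
      rw [hcondR, hcondW, hcondD]
      revert htop'
      simp only [pvCascade]
      generalize st.contains "READ" = p1
      generalize st.contains "WRITE" = p2
      generalize st.contains "DELETE" = p3
      generalize PySem.Str.isIn "READ" (pvUp op) = q1
      generalize PySem.Str.isIn "WRITE" (pvUp op) = q2
      generalize PySem.Str.isIn "DELETE" (pvUp op) = q3
      generalize rest.any (fun op => PySem.Str.isIn "READ" (pvUp op)) = r1
      generalize rest.any (fun op => PySem.Str.isIn "WRITE" (pvUp op)) = r2
      generalize rest.any (fun op => PySem.Str.isIn "REWRITE" (pvUp op)) = r3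
      generalize rest.any (fun op => PySem.Str.isIn "DELETE" (pvUp op)) = r4
      revert p1 p2 p3 q1 q2 q3 r1 r2 r3 r4
      decide

-- ===== VERDICT (by name: the statement is the Claim_ definition above) =====
theorem classify_cics_io_operations_py_spec : Claim_equal_classify_cics_io_operations_py := by
  intro cics_ops _
  show classify_cics_io_operations_py cics_ops = classify_cics_io_operations_py_alt cics_ops
  unfold classify_cics_io_operations_py classify_cics_io_operations_py_alt
  rw [pv_altGo_eq cics_ops PySem.Set.empty rfl]
  simp [pvCascade, pvUp, PySem.Set.empty, PySem.Set.contains, List.any_map, Function.comp_def]
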